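-- pv_equiv track=rewrite | github.com/mjhundekar/CSCI_544_HW2 | Stemmer_new.py | step_2
-- ===== SOURCE A (Python) =====
-- def step_2(word, r1):
--     def step_2_helper(end, repl, prev):
--         if word.endswith(end):
--             if len(word) - len(end) >= r1:
--                 if prev == []:
--                     return word[:-len(end)] + repl
--                 for p in prev:
--                     if word[:-len(end)].endswith(p):
--                         return word[:-len(end)] + repl
--             return word
--         return None
--
--     triples = [('ization', 'ize', []),
--                ('ational', 'ate', []),
--                ('fulness', 'ful', []),
--                ('ousness', 'ous', []),
--                ('iveness', 'ive', []),
--                ('tional', 'tion', []),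
--                ('biliti', 'ble', []),
--                ('lessli', 'less', []),
--                ('entli', 'ent', []),
--                ('ation', 'ate', []),
--                ('alism', 'al', []),
--                ('aliti', 'al', []),
--                ('ousli', 'ous', []),
--                ('iviti', 'ive', []),
--                ('fulli', 'ful', []),
--                ('enci', 'ence', []),
--                ('anci', 'ance', []),
--                ('abli', 'able', []),
--                ('izer', 'ize', []),
--                ('ator', 'ate', []),
--                ('alli', 'al', []),
--                ('bli', 'ble', []),
--                ('ogi', 'og', ['l']),
--                ('li', '', ['c', 'd', 'e', 'g', 'h', 'k', 'm', 'n', 'r', 't'])]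
--
--     for trip in triples:
--         attempt = step_2_helper(trip[0], trip[1], trip[2])
--         if attempt:
--             return attempt
--
--     return word
-- ===== SOURCE B (Python) =====
-- # B: dispatch table keyed on the word's last character; only the few rules whose
-- # suffix can possibly match are scanned, in the same priority order as A.
-- _RULES = {
--     'n': [('ization', 'ize', ''), ('ation', 'ate', '')],
--     'l': [('ational', 'ate', ''), ('tional', 'tion', '')],
--     's': [('fulness', 'ful', ''), ('ousness', 'ous', ''), ('iveness', 'ive', '')],
--     'm': [('alism', 'al', '')],
--     'r': [('izer', 'ize', ''), ('ator', 'ate', '')],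
--     'i': [('biliti', 'ble', ''), ('lessli', 'less', ''), ('entli', 'ent', ''),
--           ('aliti', 'al', ''), ('ousli', 'ous', ''), ('iviti', 'ive', ''),
--           ('fulli', 'ful', ''), ('enci', 'ence', ''), ('anci', 'ance', ''),
--           ('abli', 'able', ''), ('alli', 'al', ''), ('bli', 'ble', ''),
--           ('ogi', 'og', 'l'), ('li', '', 'cdeghkmnrt')],
-- }
--
--
-- def step_2(word, r1):
--     for suf, repl, prev in _RULES.get(word[-1:], []):
--         if word.endswith(suf):
--             stem = word[:-len(suf)]
--             if len(word) - len(suf) >= r1 and (not prev or any(stem.endswith(p) for p in prev)):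
--                 return stem + repl
--             return word
--     return word
-- ===== Notes on version B (the rewrite author's own statement) =====
-- stated objective: alternative
-- what changed: B replaces A's unconditional linear scan of all 24 (suffix, replacement, prev) triples by a dispatch dictionary keyed on the word's last character, so only the handful of rules whose suffix can possibly match are examined, with prev-letter sets stored as strings.
import Mathlib
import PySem

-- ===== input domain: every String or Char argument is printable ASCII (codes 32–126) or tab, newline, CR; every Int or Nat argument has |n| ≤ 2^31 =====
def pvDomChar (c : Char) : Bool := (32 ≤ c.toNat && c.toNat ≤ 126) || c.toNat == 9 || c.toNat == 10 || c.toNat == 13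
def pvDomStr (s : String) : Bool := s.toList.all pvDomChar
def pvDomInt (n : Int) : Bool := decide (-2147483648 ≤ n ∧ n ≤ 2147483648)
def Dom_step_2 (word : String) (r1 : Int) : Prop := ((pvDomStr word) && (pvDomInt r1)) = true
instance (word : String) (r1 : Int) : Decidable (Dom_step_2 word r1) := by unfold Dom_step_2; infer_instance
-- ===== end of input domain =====

set_option maxHeartbeats 1000000


-- B replaces A's linear scan of all 24 (suffix, repl, prev) triples by a dispatch table
-- keyed on the word's LAST character, scanning only the few rules that can match (alternative).

-- ===== PORT A =====
-- A's triples list; prev is a list of one-character strings, as in the Python.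
def s2Triples : List (List Char × List Char × List (List Char)) := [
  (['i', 'z', 'a', 't', 'i', 'o', 'n'], ['i', 'z', 'e'], []),
  (['a', 't', 'i', 'o', 'n', 'a', 'l'], ['a', 't', 'e'], []),
  (['f', 'u', 'l', 'n', 'e', 's', 's'], ['f', 'u', 'l'], []),
  (['o', 'u', 's', 'n', 'e', 's', 's'], ['o', 'u', 's'], []),
  (['i', 'v', 'e', 'n', 'e', 's', 's'], ['i', 'v', 'e'], []),
  (['t', 'i', 'o', 'n', 'a', 'l'], ['t', 'i', 'o', 'n'], []),
  (['b', 'i', 'l', 'i', 't', 'i'], ['b', 'l', 'e'], []),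
  (['l', 'e', 's', 's', 'l', 'i'], ['l', 'e', 's', 's'], []),
  (['e', 'n', 't', 'l', 'i'], ['e', 'n', 't'], []),
  (['a', 't', 'i', 'o', 'n'], ['a', 't', 'e'], []),
  (['a', 'l', 'i', 's', 'm'], ['a', 'l'], []),
  (['a', 'l', 'i', 't', 'i'], ['a', 'l'], []),
  (['o', 'u', 's', 'l', 'i'], ['o', 'u', 's'], []),
  (['i', 'v', 'i', 't', 'i'], ['i', 'v', 'e'], []),
  (['f', 'u', 'l', 'l', 'i'], ['f', 'u', 'l'], []),
  (['e', 'n', 'c', 'i'], ['e', 'n', 'c', 'e'], []),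
  (['a', 'n', 'c', 'i'], ['a', 'n', 'c', 'e'], []),
  (['a', 'b', 'l', 'i'], ['a', 'b', 'l', 'e'], []),
  (['i', 'z', 'e', 'r'], ['i', 'z', 'e'], []),
  (['a', 't', 'o', 'r'], ['a', 't', 'e'], []),
  (['a', 'l', 'l', 'i'], ['a', 'l'], []),
  (['b', 'l', 'i'], ['b', 'l', 'e'], []),
  (['o', 'g', 'i'], ['o', 'g'], [['l']]),
  (['l', 'i'], [], [['c'], ['d'], ['e'], ['g'], ['h'], ['k'], ['m'], ['n'], ['r'], ['t']])]

-- step_2_helper: if word.endswith(end): if len(word)-len(end) >= r1: (prev == [] / for p in prev: …); return word — else None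
def s2Helper (w : List Char) (r1 : Int) (e repl : List Char) (prev : List (List Char)) : Option (List Char) :=
  if PySem.Chars.endswith w e then
    some (if (w.length : Int) - e.length ≥ r1 then
            (if prev = [] then PySem.Chars.slice w none (some (-(e.length : Int))) ++ repl
             else match prev.find? (fun p => PySem.Chars.endswith (PySem.Chars.slice w none (some (-(e.length : Int)))) p) with
                  | some _ => PySem.Chars.slice w none (some (-(e.length : Int))) ++ repl
                  | none => w)
          else w)
  else none

-- for trip in triples: attempt = helper(…); if attempt: return attempt   ('' and None are falsy)
def s2Scan (w : List Char) (r1 : Int) : List (List Char × List Char × List (List Char)) → List Char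
  | [] => w
  | t :: ts =>
    match s2Helper w r1 t.1 t.2.1 t.2.2 with
    | some a => if a = [] then s2Scan w r1 ts else a
    | none => s2Scan w r1 ts

def step_2 (word : String) (r1 : Int) : String := String.ofList (s2Scan word.toList r1 s2Triples)

-- ===== PORT B =====
-- B's _RULES: last character ↦ list of (suffix, replacement, allowed-previous-letters) strings.
def s2Rules : PySem.Dict (List Char) (List (String × String × String)) := PySem.Dict.mk [
  (['n'], [("ization", "ize", ""), ("ation", "ate", "")]),
  (['l'], [("ational", "ate", ""), ("tional", "tion", "")]),
  (['s'], [("fulness", "ful", ""), ("ousness", "ous", ""), ("iveness", "ive", "")]),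
  (['m'], [("alism", "al", "")]),
  (['r'], [("izer", "ize", ""), ("ator", "ate", "")]),
  (['i'], [("biliti", "ble", ""), ("lessli", "less", ""), ("entli", "ent", ""),
           ("aliti", "al", ""), ("ousli", "ous", ""), ("iviti", "ive", ""),
           ("fulli", "ful", ""), ("enci", "ence", ""), ("anci", "ance", ""),
           ("abli", "able", ""), ("alli", "al", ""), ("bli", "ble", ""),
           ("ogi", "og", "l"), ("li", "", "cdeghkmnrt")])]

-- the for-loop of B: first matching suffix decides; no fallback to later rules
def s2Apply (w : List Char) (r1 : Int) : List (String × String × String) → List Char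
  | [] => w
  | (suf, repl, prev) :: rest =>
    if PySem.Chars.endswith w suf.toList then
      let stem := PySem.Chars.slice w none (some (-(suf.toList.length : Int)))
      if decide ((w.length : Int) - suf.toList.length ≥ r1) &&
         (decide (prev = "") || prev.toList.any (fun c => PySem.Chars.endswith stem [c]))
      then stem ++ repl.toList else w
    else s2Apply w r1 rest

def step_2_alt (word : String) (r1 : Int) : String :=
  String.ofList (s2Apply word.toList r1
    ((s2Rules.get? (PySem.Chars.slice word.toList (some (-1)) none)).getD []))

-- ===== PRECONDITION & SPEC =====
def Spec_step_2 (word : String) (r1 : Int) (out : String) : Prop := out = step_2_alt word r1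
instance (word : String) (r1 : Int) (out : String) : Decidable (Spec_step_2 word r1 out) := by unfold Spec_step_2; infer_instance

-- ===== CLAIM (what is proved, stated in full; the proofs are below) =====
def Claim_equal_step_2 : Prop := ∀ (word : String) (r1 : Int), Dom_step_2 word r1 → Spec_step_2 word r1 (step_2 word r1)

-- ===== LEMMAS AND PROOFS =====

lemma s2_endswith_false_of_last_ne (w e : List Char) (he : e ≠ [])
    (h : e.getLast? ≠ w.getLast?) : PySem.Chars.endswith w e = false := by
  rw [Bool.eq_false_iff]
  intro hh
  obtain ⟨t, ht⟩ := (PySem.Chars.endswith_iff w e).mp hh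
  apply h
  rw [← ht, List.getLast?_append_of_ne_nil _ he]

lemma s2_nonempty_of_endswith (w e : List Char) (he : e ≠ [])
    (h : PySem.Chars.endswith w e = true) : w ≠ [] := by
  obtain ⟨t, ht⟩ := (PySem.Chars.endswith_iff w e).mp h
  intro hw
  rw [hw] at ht
  rcases List.append_eq_nil_iff.mp ht with ⟨-, h2⟩
  exact he h2

-- A's scan only sees the triples whose suffix ends in the word's last character
lemma s2_scan_filter (w : List Char) (r1 : Int) :
    ∀ ts : List (List Char × List Char × List (List Char)), (∀ t ∈ ts, t.1 ≠ []) →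
      s2Scan w r1 ts = s2Scan w r1 (ts.filter (fun t => t.1.getLast? == w.getLast?)) := by
  intro ts
  induction ts with
  | nil => intro _; rfl
  | cons t ts ih =>
    intro hne
    have hts : ∀ t ∈ ts, t.1 ≠ [] := fun x hx => hne x (List.mem_cons_of_mem _ hx)
    by_cases hb : t.1.getLast? = w.getLast?
    · rw [List.filter_cons_of_pos (by simp [hb])]
      cases h : s2Helper w r1 t.1 t.2.1 t.2.2 with
      | none => simp [s2Scan, h, ih hts]
      | some a => simp [s2Scan, h, ih hts]
    · have hfalse : PySem.Chars.endswith w t.1 = false :=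
        s2_endswith_false_of_last_ne w t.1 (hne t (List.mem_cons_self)) hb
      rw [List.filter_cons_of_neg (by simp [hb])]
      have hnone : s2Helper w r1 t.1 t.2.1 t.2.2 = none := by simp [s2Helper, hfalse]
      simp [s2Scan, hnone, ih hts]

-- one step of the two loops, rule with empty prev
lemma s2_step_empty (w : List Char) (r1 : Int) (suf repl : String) (e rl : List Char)
    (hsuf : suf.toList = e) (hrl : repl.toList = rl) (he : e ≠ []) (hrl0 : rl ≠ [])
    (ts : List (List Char × List Char × List (List Char))) (rules : List (String × String × String))
    (IH : s2Scan w r1 ts = s2Apply w r1 rules) :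
    s2Scan w r1 ((e, rl, []) :: ts) = s2Apply w r1 ((suf, repl, "") :: rules) := by
  by_cases hend : PySem.Chars.endswith w e = true
  · have hw : w ≠ [] := s2_nonempty_of_endswith w e he hend
    have ha : (if (w.length : Int) - e.length ≥ r1 then
        PySem.Chars.slice w none (some (-(e.length : Int))) ++ rl else w) ≠ [] := by
      split
      · simp [hrl0]
      · exact hw
    simp only [s2Scan, s2Helper, hend, if_true]
    rw [if_neg ha]
    simp only [s2Apply, hsuf, hend, hrl, if_true]
    by_cases hr : (w.length : Int) - e.length ≥ r1
    · simp [hr]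
    · simp [hr]
  · rw [Bool.not_eq_true] at hend
    have hnone : s2Helper w r1 e rl [] = none := by simp [s2Helper, hend]
    simp only [s2Scan, hnone]
    simp only [s2Apply, hsuf, hend]
    simpa using IH

-- one step, rule with a non-empty prev letter list
lemma s2_step_prev (w : List Char) (r1 : Int) (suf repl prev : String) (e rl pc : List Char)
    (plist : List (List Char))
    (hsuf : suf.toList = e) (hrl : repl.toList = rl) (hpc : prev.toList = pc)
    (hmap : plist = pc.map (fun c => [c])) (he : e ≠ []) (hpc0 : pc ≠ [])
    (ts : List (List Char × List Char × List (List Char))) (rules : List (String × String × String))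
    (IH : s2Scan w r1 ts = s2Apply w r1 rules) :
    s2Scan w r1 ((e, rl, plist) :: ts) = s2Apply w r1 ((suf, repl, prev) :: rules) := by
  have hprevne : prev ≠ "" := by
    intro h
    rw [h] at hpc
    exact hpc0 hpc.symm
  by_cases hend : PySem.Chars.endswith w e = true
  · have hw : w ≠ [] := s2_nonempty_of_endswith w e he hend
    have hplne : plist ≠ [] := by
      rw [hmap]
      simpa using hpc0
    have hfind : plist.find? (fun p => PySem.Chars.endswith (PySem.Chars.slice w none (some (-(e.length : Int)))) p)
        = (pc.find? (fun c => PySem.Chars.endswith (PySem.Chars.slice w none (some (-(e.length : Int)))) [c])).map (fun c => [c]) := by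
      rw [hmap, List.find?_map]
      rfl
    simp only [s2Scan, s2Helper, hend, if_true, if_neg hplne, hfind]
    simp only [s2Apply, hsuf, hend, hrl, hpc, if_true, decide_eq_false hprevne, Bool.false_or]
    by_cases hr : (w.length : Int) - e.length ≥ r1
    · rw [if_pos hr]
      cases hf : pc.find? (fun c => PySem.Chars.endswith (PySem.Chars.slice w none (some (-(e.length : Int)))) [c]) with
      | none =>
        have hanyf : (pc.any fun x => PySem.Chars.endswith (PySem.Chars.slice w none (some (-(e.length : Int)))) [x]) = false := by
          rw [Bool.eq_false_iff]
          intro hh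
          obtain ⟨x, hx, hpx⟩ := List.any_eq_true.mp hh
          exact List.find?_eq_none.mp hf x hx hpx
        simp only [Option.map_none]
        rw [if_neg hw]
        rw [hanyf, Bool.and_false, if_neg (by simp)]
      | some c =>
        have hcp : PySem.Chars.endswith (PySem.Chars.slice w none (some (-(e.length : Int)))) [c] = true := by
          simpa using List.find?_some (p := fun c => PySem.Chars.endswith (PySem.Chars.slice w none (some (-(e.length : Int)))) [c]) hf
        have hstem : PySem.Chars.slice w none (some (-(e.length : Int))) ≠ [] :=
          s2_nonempty_of_endswith _ [c] (by simp) hcp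
        have hany : pc.any (fun c => PySem.Chars.endswith (PySem.Chars.slice w none (some (-(e.length : Int)))) [c]) = true :=
          List.any_eq_true.mpr ⟨c, List.mem_of_find?_eq_some hf, hcp⟩
        have hcond : (decide ((w.length : Int) - e.length ≥ r1) &&
            (pc.any fun x => PySem.Chars.endswith (PySem.Chars.slice w none (some (-(e.length : Int)))) [x])) = true := by
          rw [Bool.and_eq_true, decide_eq_true_eq]
          exact ⟨hr, hany⟩
        simp only [Option.map_some]
        rw [if_neg (fun hcon => hstem (List.append_eq_nil_iff.mp hcon).1)]
        rw [if_pos hcond]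
    · simp [hr, hw]
  · rw [Bool.not_eq_true] at hend
    have hnone : s2Helper w r1 e rl plist = none := by simp [s2Helper, hend]
    simp only [s2Scan, hnone]
    simp only [s2Apply, hsuf, hend]
    simpa using IH

lemma s2_drop_last (w : List Char) (c : Char) (hl : w.getLast? = some c) :
    w.drop (w.length - 1) = [c] := by
  obtain ⟨l', rfl⟩ := List.getLast?_eq_some_iff.mp hl
  rw [show (l' ++ [c]).length - 1 = l'.length by simp]
  exact List.drop_left

-- the whole equivalence, at the character-list level
lemma s2_main (w : List Char) (r1 : Int) :
    s2Scan w r1 s2Triples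
      = s2Apply w r1 ((s2Rules.get? (PySem.Chars.slice w (some (-1)) none)).getD []) := by
  rw [s2_scan_filter w r1 s2Triples (by decide)]
  rw [show PySem.Chars.slice w (some (-1)) none = w.drop (w.length - 1) from PySem.List.slice_from_neg_one w]
  rcases hl : w.getLast? with _ | c
  · have hw : w = [] := List.getLast?_eq_none_iff.mp hl
    subst hw
    rfl
  · rw [s2_drop_last w c hl]
    by_cases h1 : c = 'n'
    · subst h1
      refine s2_step_empty w r1 _ _ _ _ (by decide) (by decide) (by decide) (by decide) _ _ ?_
      refine s2_step_empty w r1 _ _ _ _ (by decide) (by decide) (by decide) (by decide) _ _ ?_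
      rfl
    by_cases h2 : c = 'l'
    · subst h2
      refine s2_step_empty w r1 _ _ _ _ (by decide) (by decide) (by decide) (by decide) _ _ ?_
      refine s2_step_empty w r1 _ _ _ _ (by decide) (by decide) (by decide) (by decide) _ _ ?_
      rfl
    by_cases h3 : c = 's'
    · subst h3
      refine s2_step_empty w r1 _ _ _ _ (by decide) (by decide) (by decide) (by decide) _ _ ?_
      refine s2_step_empty w r1 _ _ _ _ (by decide) (by decide) (by decide) (by decide) _ _ ?_
      refine s2_step_empty w r1 _ _ _ _ (by decide) (by decide) (by decide) (by decide) _ _ ?_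
      rfl
    by_cases h4 : c = 'm'
    · subst h4
      refine s2_step_empty w r1 _ _ _ _ (by decide) (by decide) (by decide) (by decide) _ _ ?_
      rfl
    by_cases h5 : c = 'r'
    · subst h5
      refine s2_step_empty w r1 _ _ _ _ (by decide) (by decide) (by decide) (by decide) _ _ ?_
      refine s2_step_empty w r1 _ _ _ _ (by decide) (by decide) (by decide) (by decide) _ _ ?_
      rfl
    by_cases h6 : c = 'i'
    · subst h6
      refine s2_step_empty w r1 _ _ _ _ (by decide) (by decide) (by decide) (by decide) _ _ ?_
      refine s2_step_empty w r1 _ _ _ _ (by decide) (by decide) (by decide) (by decide) _ _ ?_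
      refine s2_step_empty w r1 _ _ _ _ (by decide) (by decide) (by decide) (by decide) _ _ ?_
      refine s2_step_empty w r1 _ _ _ _ (by decide) (by decide) (by decide) (by decide) _ _ ?_
      refine s2_step_empty w r1 _ _ _ _ (by decide) (by decide) (by decide) (by decide) _ _ ?_
      refine s2_step_empty w r1 _ _ _ _ (by decide) (by decide) (by decide) (by decide) _ _ ?_
      refine s2_step_empty w r1 _ _ _ _ (by decide) (by decide) (by decide) (by decide) _ _ ?_
      refine s2_step_empty w r1 _ _ _ _ (by decide) (by decide) (by decide) (by decide) _ _ ?_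
      refine s2_step_empty w r1 _ _ _ _ (by decide) (by decide) (by decide) (by decide) _ _ ?_
      refine s2_step_empty w r1 _ _ _ _ (by decide) (by decide) (by decide) (by decide) _ _ ?_
      refine s2_step_empty w r1 _ _ _ _ (by decide) (by decide) (by decide) (by decide) _ _ ?_
      refine s2_step_empty w r1 _ _ _ _ (by decide) (by decide) (by decide) (by decide) _ _ ?_
      refine s2_step_prev w r1 _ _ _ _ _ ['l'] _ (by decide) (by decide) (by decide) (by decide) (by decide) (by decide) _ _ ?_
      refine s2_step_prev w r1 _ _ _ _ _ ['c','d','e','g','h','k','m','n','r','t'] _ (by decide) (by decide) (by decide) (by decide) (by decide) (by decide) _ _ ?_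
      rfl
    · have hfilter : s2Triples.filter (fun t => t.1.getLast? == some c) = [] := by
        rw [List.filter_eq_nil_iff]
        intro t ht
        fin_cases ht <;> simp_all <;>
          first
          | exact fun h => h1 h.symm
          | exact fun h => h2 h.symm
          | exact fun h => h3 h.symm
          | exact fun h => h4 h.symm
          | exact fun h => h5 h.symm
          | exact fun h => h6 h.symm
      have hget : s2Rules.get? [c] = none := by
        simp only [s2Rules, PySem.Dict.get?_mk_cons]
        rw [if_neg (by simp [Ne.symm h1]), if_neg (by simp [Ne.symm h2]), if_neg (by simp [Ne.symm h3]),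
            if_neg (by simp [Ne.symm h4]), if_neg (by simp [Ne.symm h5]), if_neg (by simp [Ne.symm h6])]
        rfl
      rw [hfilter, hget]
      rfl

theorem step_2_spec : Claim_equal_step_2 := by
  intro word r1 _
  unfold Spec_step_2 step_2 step_2_alt
  rw [s2_main]
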